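-- pv_equiv track=rewrite | github.com/ressomlab/MetFID | msms_data_process.py | fp_conversion
-- ===== SOURCE A (Python) =====
-- def fp_conversion(fp3, fp4, macc):
--     """
--     Converts fp3, fp4, and MACCs to a new fingerprint.
--     :param fp3: FP3 fingerprint (55 digits)
--     :param fp4: FP4 fingerprint (307 digits)
--     :param macc: MACCS (166 digits)
--     :return: combined fingerprint with length of 528
--     """
--     fp3_temp = list(range(1, 56))
--     fp4_temp = list(range(1, 308))
--     macc_temp = list(range(1, 167))
--     fp3_box = [0] * len(fp3_temp)
--     fp4_box = [0] * len(fp4_temp)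
--     macc_box = [0] * len(macc_temp)
--
--     for i in range(len(fp3_temp)):
--         if fp3_temp[i] in fp3:
--             fp3_box[i] = 1
--
--     for i in range(len(fp4_temp)):
--         if fp4_temp[i] in fp4:
--             fp4_box[i] = 1
--
--     for i in range(len(macc_temp)):
--         if macc_temp[i] in macc:
--             macc_box[i] = 1
--
--     return fp3_box + fp4_box + macc_box
-- ===== SOURCE B (Python) =====
-- def fp_conversion(fp3, fp4, macc):
--     """Scatter over fingerprint members instead of testing every position."""
--     def scatter(n, fp):
--         box = [0] * n
--         for v in fp:
--             if 1 <= v <= n: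
--                 box[int(v) - 1] = 1
--         return box
--     return scatter(55, fp3) + scatter(307, fp4) + scatter(166, macc)
-- ===== Notes on version B (the rewrite author's own statement) =====
-- stated objective: faster
-- what changed: Replaces the gather loops that test every one of the 528 positions for membership (each an O(len(fp)) scan) with scatter loops that iterate once over each fingerprint's members and set the corresponding bit.
import Mathlib
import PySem

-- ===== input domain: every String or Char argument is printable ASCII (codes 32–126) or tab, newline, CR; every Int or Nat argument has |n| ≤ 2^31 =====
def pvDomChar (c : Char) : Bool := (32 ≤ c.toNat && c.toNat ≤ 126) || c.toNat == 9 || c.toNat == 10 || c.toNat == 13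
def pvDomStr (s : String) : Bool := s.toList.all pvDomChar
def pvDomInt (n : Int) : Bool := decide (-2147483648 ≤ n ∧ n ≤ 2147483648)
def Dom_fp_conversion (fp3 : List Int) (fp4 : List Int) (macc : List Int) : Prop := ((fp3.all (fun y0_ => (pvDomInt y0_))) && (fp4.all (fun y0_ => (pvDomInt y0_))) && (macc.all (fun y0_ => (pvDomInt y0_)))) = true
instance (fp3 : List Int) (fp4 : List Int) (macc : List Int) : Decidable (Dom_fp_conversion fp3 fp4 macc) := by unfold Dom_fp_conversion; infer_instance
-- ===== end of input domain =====

-- B replaces A's 528 per-position membership scans (gather) with one pass over each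
-- fingerprint's members that sets the matching bit (scatter); measurably faster on long inputs.

-- ===== PORT A =====
-- 'for i in range(len(temp)): if temp[i] in fp: box[i] = 1'.
-- The index i is always in range, so temp[i] is ported as temp.getD i 0 (exact here).
def pvGatherLoop (temp : List Int) (fp : List Int) (box : List Int) : List Int :=
  (List.range temp.length).foldl (fun b i => if temp.getD i 0 ∈ fp then b.set i 1 else b) box

def fp_conversion (fp3 : List Int) (fp4 : List Int) (macc : List Int) : List Int :=
  let fp3_temp := PySem.List.pyRange 1 56 1
  let fp4_temp := PySem.List.pyRange 1 308 1
  let macc_temp := PySem.List.pyRange 1 167 1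
  let fp3_box := List.replicate fp3_temp.length (0 : Int)
  let fp4_box := List.replicate fp4_temp.length (0 : Int)
  let macc_box := List.replicate macc_temp.length (0 : Int)
  pvGatherLoop fp3_temp fp3 fp3_box ++ pvGatherLoop fp4_temp fp4 fp4_box
    ++ pvGatherLoop macc_temp macc macc_box

-- ===== PORT B =====
-- 'box = [0]*n; for v in fp: if 1 <= v <= n: box[int(v)-1] = 1'
def pvScatter (n : Nat) (fp : List Int) : List Int :=
  fp.foldl (fun b v => if 1 ≤ v ∧ v ≤ (n : Int) then b.set (v - 1).toNat 1 else b)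
    (List.replicate n (0 : Int))

def fp_conversion_alt (fp3 : List Int) (fp4 : List Int) (macc : List Int) : List Int :=
  pvScatter 55 fp3 ++ pvScatter 307 fp4 ++ pvScatter 166 macc

-- ===== PRECONDITION & SPEC =====
def Spec_fp_conversion (fp3 : List Int) (fp4 : List Int) (macc : List Int) (out : List Int) : Prop := out = fp_conversion_alt fp3 fp4 macc
instance (fp3 : List Int) (fp4 : List Int) (macc : List Int) (out : List Int) : Decidable (Spec_fp_conversion fp3 fp4 macc out) := by unfold Spec_fp_conversion; infer_instance

-- ===== CLAIM (what is proved, stated in full; the proofs are below) =====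
def Claim_equal_fp_conversion : Prop := ∀ (fp3 : List Int) (fp4 : List Int) (macc : List Int), Dom_fp_conversion fp3 fp4 macc → Spec_fp_conversion fp3 fp4 macc (fp_conversion fp3 fp4 macc)

-- ===== LEMMAS AND PROOFS =====

theorem pv_foldl_ifset_length (L : List Nat) (p : Nat → Prop) [DecidablePred p] (b : List Int) :
    (L.foldl (fun b i => if p i then b.set i 1 else b) b).length = b.length := by
  induction L generalizing b with
  | nil => rfl
  | cons i L ih =>
    simp only [List.foldl_cons]
    rw [ih]
    split <;> simp

theorem pv_foldl_ifset_getElem (L : List Nat) (p : Nat → Prop) [DecidablePred p] (b : List Int)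
    (j : Nat) (hj : j < b.length)
    (hlen : j < (L.foldl (fun b i => if p i then b.set i 1 else b) b).length) :
    (L.foldl (fun b i => if p i then b.set i 1 else b) b)[j] =
      if j ∈ L ∧ p j then 1 else b[j] := by
  induction L generalizing b with
  | nil => simp
  | cons i L ih =>
    simp only [List.foldl_cons] at hlen ⊢
    rw [ih (if p i then b.set i 1 else b) (by split <;> simp [hj]) hlen]
    by_cases hpi : p i
    · by_cases hij : i = j
      · subst hij
        simp [hpi]
      · have hji : ¬ j = i := fun h => hij h.symm
        simp only [if_pos hpi, List.getElem_set, if_neg hij, List.mem_cons]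
        have : ((j = i ∨ j ∈ L) ∧ p j) ↔ (j ∈ L ∧ p j) := by
          constructor
          · rintro ⟨h | h, hpj⟩
            · exact absurd h hji
            · exact ⟨h, hpj⟩
          · rintro ⟨h, hpj⟩; exact ⟨Or.inr h, hpj⟩
        exact (if_congr this rfl rfl).symm
    · simp only [if_neg hpi, List.mem_cons]
      have : ((j = i ∨ j ∈ L) ∧ p j) ↔ (j ∈ L ∧ p j) := by
        constructor
        · rintro ⟨h | h, hpj⟩
          · exact absurd (h ▸ hpj) hpi
          · exact ⟨h, hpj⟩
        · rintro ⟨h, hpj⟩; exact ⟨Or.inr h, hpj⟩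
      exact (if_congr this rfl rfl).symm

theorem pvScatter_length_aux (fp : List Int) (n : Nat) (b : List Int) :
    (fp.foldl (fun b v => if 1 ≤ v ∧ v ≤ (n : Int) then b.set (v - 1).toNat 1 else b) b).length
      = b.length := by
  induction fp generalizing b with
  | nil => rfl
  | cons v fp ih =>
    simp only [List.foldl_cons]
    rw [ih]
    split <;> simp

theorem pvScatter_getElem_aux (fp : List Int) (n : Nat) (b : List Int) (hb : b.length = n)
    (j : Nat) (hj : j < n)
    (hlen : j < (fp.foldl (fun b v => if 1 ≤ v ∧ v ≤ (n : Int) then b.set (v - 1).toNat 1 else b) b).length) :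
    (fp.foldl (fun b v => if 1 ≤ v ∧ v ≤ (n : Int) then b.set (v - 1).toNat 1 else b) b)[j] =
      if ((j : Int) + 1) ∈ fp then 1 else b[j]'(by omega) := by
  induction fp generalizing b with
  | nil => simp
  | cons v fp ih =>
    simp only [List.foldl_cons] at hlen ⊢
    rw [ih (if 1 ≤ v ∧ v ≤ (n : Int) then b.set (v - 1).toNat 1 else b)
        (by split <;> simp [hb]) hlen]
    by_cases hv : v = (j : Int) + 1
    · subst hv
      have hg : 1 ≤ (j : Int) + 1 ∧ (j : Int) + 1 ≤ (n : Int) := by constructor <;> omega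
      simp [hg]
    · have hmc : (((j : Int) + 1) ∈ v :: fp) ↔ (((j : Int) + 1) ∈ fp) := by
        rw [List.mem_cons]
        exact ⟨fun h => h.resolve_left (fun he => hv he.symm), Or.inr⟩
      by_cases hm : ((j : Int) + 1) ∈ fp
      · simp [hm, hmc]
      · by_cases hg : 1 ≤ v ∧ v ≤ (n : Int)
        · simp only [if_pos hg]
          rw [List.getElem_set, if_neg (fun h => hm (hmc.mp h)), if_neg (by omega : ¬((v - 1).toNat = j)), if_neg hm]
        · simp only [if_neg hg]
          rw [if_neg (fun h => hm (hmc.mp h)), if_neg hm]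

theorem pvGather_eq_pvScatter (fp : List Int) (n : Nat) :
    pvGatherLoop (PySem.List.pyRange 1 ((n : Int) + 1) 1) fp
        (List.replicate (PySem.List.pyRange 1 ((n : Int) + 1) 1).length (0 : Int))
      = pvScatter n fp := by
  have hlenR : (PySem.List.pyRange 1 ((n : Int) + 1) 1).length = n := by
    rw [PySem.List.length_pyRange_one]; omega
  apply List.ext_getElem
  · simp only [pvGatherLoop, pvScatter]
    rw [pv_foldl_ifset_length, pvScatter_length_aux]
    simp [hlenR]
  · intro j hj1 hj2
    have hjn : j < n := by
      simp only [pvScatter] at hj2; rw [pvScatter_length_aux] at hj2; simpa using hj2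
    simp only [pvGatherLoop, pvScatter]
    rw [pv_foldl_ifset_getElem _ _ _ j (by simp [hlenR, hjn])]
    rw [pvScatter_getElem_aux fp n _ (by simp) j hjn]
    have htemp : (PySem.List.pyRange 1 ((n : Int) + 1) 1).getD j 0 = (j : Int) + 1 := by
      rw [List.getD, List.getElem?_eq_getElem (by omega), Option.getD_some,
        PySem.List.getElem_pyRange_one]
      omega
    rw [htemp]
    have hmemrange : j ∈ List.range (PySem.List.pyRange 1 ((n : Int) + 1) 1).length := by
      rw [List.mem_range, hlenR]; exact hjn
    by_cases hm : ((j : Int) + 1) ∈ fp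
    · rw [if_pos ⟨hmemrange, hm⟩, if_pos hm]
    · rw [if_neg (by rintro ⟨_, h⟩; exact hm h), if_neg hm]
      simp [hlenR]

-- ===== VERDICT (by name: the statement is the Claim_ definition above) =====
theorem fp_conversion_spec : Claim_equal_fp_conversion := by
  intro fp3 fp4 macc _
  show fp_conversion fp3 fp4 macc = fp_conversion_alt fp3 fp4 macc
  simp only [fp_conversion, fp_conversion_alt]
  rw [show (56 : Int) = (55 : Nat) + 1 by norm_num,
      show (308 : Int) = (307 : Nat) + 1 by norm_num,
      show (167 : Int) = (166 : Nat) + 1 by norm_num]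
  rw [pvGather_eq_pvScatter fp3 55, pvGather_eq_pvScatter fp4 307,
      pvGather_eq_pvScatter macc 166]
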